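-- pv_equiv track=rewrite | github.com/ShreyanshTripathy/Stochastic_Modelling_of_lifts | Adaptive Lift System/adaptive_lift copy.py | data_sorter
-- ===== SOURCE A (Python) =====
-- def data_sorter(passenger_data, lift_postion):
--     '''
--     Function to sort passenger data based on their arrival time and the distance
--     from the current lift position.
--     '''
--     # Initialize an empty dictionary to hold the grouped tuples
--     grouped_by_index_3 = {}
--
--     # Iterate over each tuple in the data
--     for item in passenger_data:
--         # Get the value at the fourth index (index 3)
--         key = item[3]
--
--         # Add the item to the corresponding list in the dictionary
--         grouped_by_index_3.setdefault(key, []).append(item)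
--
--     sorted_data = []
--
--     # Iterate over the groups in the dictionary
--     for group in grouped_by_index_3.values():
--         # Sort each group based on the absolute difference between the second index value (index 1) and the given position
--         sorted_group = sorted(group, key=lambda x: abs(x[1] - lift_postion))
--         # Extend the sorted_data list with the sorted group
--         sorted_data.extend(sorted_group)
--
--     return sorted_data
-- ===== SOURCE B (Python) =====
-- def data_sorter(passenger_data, lift_postion):
--     '''Sort passengers grouped by first-seen key (index 3), each group ordered by
--     distance from the lift; peel off one group at a time instead of building a dict.'''
--     out = []
--     remaining = passenger_data
--     while remaining:
--         k = remaining[0][3]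
--         out += sorted([x for x in remaining if x[3] == k],
--                       key=lambda x: abs(x[1] - lift_postion))
--         remaining = [x for x in remaining if x[3] != k]
--     return out
-- ===== Notes on version B (the rewrite author's own statement) =====
-- stated objective: alternative
-- what changed: Replaces A's dict-of-groups (setdefault/append, then concatenate sorted dict values) with a dict-free loop that repeatedly peels off the first remaining key's group, sorts it and filters it out of the remainder.
import Mathlib
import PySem

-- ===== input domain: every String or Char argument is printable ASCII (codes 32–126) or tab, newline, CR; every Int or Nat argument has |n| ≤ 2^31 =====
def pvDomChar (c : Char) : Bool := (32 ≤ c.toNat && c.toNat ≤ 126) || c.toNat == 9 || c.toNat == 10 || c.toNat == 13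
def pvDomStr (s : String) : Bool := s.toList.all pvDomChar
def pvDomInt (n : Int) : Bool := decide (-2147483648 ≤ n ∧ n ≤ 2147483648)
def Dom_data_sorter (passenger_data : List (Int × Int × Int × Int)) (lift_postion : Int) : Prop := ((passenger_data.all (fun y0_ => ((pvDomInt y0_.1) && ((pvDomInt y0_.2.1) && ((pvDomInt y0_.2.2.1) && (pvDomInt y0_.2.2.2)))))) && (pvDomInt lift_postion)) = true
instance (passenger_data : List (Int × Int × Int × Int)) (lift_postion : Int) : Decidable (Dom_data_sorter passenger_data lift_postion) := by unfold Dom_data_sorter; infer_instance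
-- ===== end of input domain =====

-- B replaces A's dict-of-groups with a loop that repeatedly peels off the first remaining
-- group and sorts it; same return value, chosen as an alternative decomposition (no dict).

-- ===== PORT A =====
-- grouped_by_index_3.setdefault(key, []).append(item)  ==  modify key [] (· ++ [item])
def data_sorter (passenger_data : List (Int × Int × Int × Int)) (lift_postion : Int) : List (Int × Int × Int × Int) :=
  (passenger_data.foldl
      (fun grouped_by_index_3 item => grouped_by_index_3.modify item.2.2.2 [] (· ++ [item]))
      (PySem.Dict.empty : PySem.Dict Int (List (Int × Int × Int × Int)))).values.foldl
    (fun sorted_data group =>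
      sorted_data ++ PySem.List.sorted group (fun x => |x.2.1 - lift_postion|) false) []

-- ===== PORT B =====
-- the while loop of Source B: first parameter = remaining, second = out
def dsGo (lift_postion : Int) (remaining acc : List (Int × Int × Int × Int)) :
    List (Int × Int × Int × Int) :=
  match remaining with
  | [] => acc
  | x :: t =>
      dsGo lift_postion
        ((x :: t).filter (fun y => !(y.2.2.2 == x.2.2.2)))
        (acc ++ PySem.List.sorted ((x :: t).filter (fun y => y.2.2.2 == x.2.2.2))
                 (fun y => |y.2.1 - lift_postion|) false)
termination_by remaining.length
decreasing_by
  simp only [List.filter_cons, beq_self_eq_true, Bool.not_true, Bool.false_eq_true,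
    if_false, List.length_cons]
  have := List.length_filter_le (fun y : Int × Int × Int × Int => !(y.2.2.2 == x.2.2.2)) t
  omega

def data_sorter_alt (passenger_data : List (Int × Int × Int × Int)) (lift_postion : Int) : List (Int × Int × Int × Int) :=
  dsGo lift_postion passenger_data []

-- ===== PRECONDITION & SPEC =====
def Spec_data_sorter (passenger_data : List (Int × Int × Int × Int)) (lift_postion : Int) (out : List (Int × Int × Int × Int)) : Prop := out = data_sorter_alt passenger_data lift_postion
instance (passenger_data : List (Int × Int × Int × Int)) (lift_postion : Int) (out : List (Int × Int × Int × Int)) : Decidable (Spec_data_sorter passenger_data lift_postion out) := by unfold Spec_data_sorter; infer_instance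

-- ===== CLAIM (what is proved, stated in full; the proofs are below) =====
def Claim_equal_data_sorter : Prop := ∀ (passenger_data : List (Int × Int × Int × Int)) (lift_postion : Int), Dom_data_sorter passenger_data lift_postion → Spec_data_sorter passenger_data lift_postion (data_sorter passenger_data lift_postion)

-- ===== LEMMAS AND PROOFS =====

-- peeling the first element of a set-building fold
theorem foldl_add_cons {α : Type} [DecidableEq α] (l : List α) (a : α) (S : List α) :
    l.foldl PySem.Set.add (a :: S) = a :: (l.filter (fun b => !(b == a))).foldl PySem.Set.add S := by
  induction l generalizing S with
  | nil => simp
  | cons b t ih =>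
    by_cases hb : b = a
    · subst hb
      have h1 : PySem.Set.add (b :: S) b = b :: S := by
        simp [PySem.Set.add, PySem.Set.contains]
      simp only [List.foldl_cons, List.filter_cons, beq_self_eq_true, Bool.not_true,
        Bool.false_eq_true, if_false, h1]
      exact ih S
    · have h1 : PySem.Set.add (a :: S) b = a :: PySem.Set.add S b := by
        simp only [PySem.Set.add, PySem.Set.contains, List.contains_cons]
        have : (b == a) = false := by simp [hb]
        rw [this]
        simp only [Bool.false_or]
        split <;> simp
      have hf : (!(b == a)) = true := by simp [hb]
      simp only [List.foldl_cons, List.filter_cons, hf, if_true, h1]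
      exact ih (PySem.Set.add S b)

theorem ofList_cons {α : Type} [DecidableEq α] (a : α) (l : List α) :
    PySem.Set.ofList (a :: l) = a :: PySem.Set.ofList (l.filter (fun b => !(b == a))) := by
  rw [PySem.Set.ofList_eq_foldl, PySem.Set.ofList_eq_foldl]
  have h0 : PySem.Set.add ([] : List α) a = [a] := by
    simp [PySem.Set.add, PySem.Set.contains]
  rw [List.foldl_cons, h0]
  exact foldl_add_cons l a []

-- the grouping dict of port A, characterised via the PySem dict lemmas
theorem nodup_group (pd : List (Int × Int × Int × Int)) :
    (pd.foldl (fun d x => d.modify x.2.2.2 [] (· ++ [x]))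
      (PySem.Dict.empty : PySem.Dict Int (List (Int × Int × Int × Int)))).keys.Nodup :=
  PySem.Dict.nodup_keys_foldl_modify_key pd (fun x => x.2.2.2) [] (fun _ x => (· ++ [x]))
    PySem.Dict.empty PySem.Dict.nodup_keys_empty

theorem keys_group (pd : List (Int × Int × Int × Int)) :
    (pd.foldl (fun d x => d.modify x.2.2.2 [] (· ++ [x]))
      (PySem.Dict.empty : PySem.Dict Int (List (Int × Int × Int × Int)))).keys
      = PySem.Set.ofList (pd.map (fun x => x.2.2.2)) := by
  have h := PySem.Dict.keys_foldl_modify_key pd (fun x => x.2.2.2) [] (fun _ x => (· ++ [x]))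
    (PySem.Dict.empty : PySem.Dict Int (List (Int × Int × Int × Int)))
  simpa [PySem.Set.update, PySem.Set.ofList, PySem.Set.empty] using h

theorem getD_group (pd : List (Int × Int × Int × Int)) (c : Int) :
    (pd.foldl (fun d x => d.modify x.2.2.2 [] (· ++ [x]))
      (PySem.Dict.empty : PySem.Dict Int (List (Int × Int × Int × Int)))).getD c []
      = pd.filter (fun x => x.2.2.2 == c) := by
  have h := PySem.Dict.getD_foldl_modify_append (pd.map (fun x => (x.2.2.2, x)))
    (PySem.Dict.empty : PySem.Dict Int (List (Int × Int × Int × Int))) c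
  rw [List.foldl_map] at h
  simpa [List.filter_map, Function.comp_def, List.map_map] using h

-- A in closed form: concatenation, over the first-seen distinct keys, of the sorted groups
theorem dataSorter_eq_flat (pd : List (Int × Int × Int × Int)) (lp : Int) :
    data_sorter pd lp =
      (PySem.Set.ofList (pd.map (fun x => x.2.2.2))).flatMap
        (fun k => PySem.List.sorted (pd.filter (fun x => x.2.2.2 == k))
                   (fun x => |x.2.1 - lp|) false) := by
  unfold data_sorter
  rw [PySem.Dict.values_eq_map_keys _ (nodup_group pd) [],
    PySem.List.foldl_append_eq_flatMap,
    List.flatMap_map, keys_group]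
  simp only [List.nil_append]
  congr 1
  funext k
  rw [getD_group]

theorem dsGo_acc (lp : Int) (rem acc : List (Int × Int × Int × Int)) :
    dsGo lp rem acc = acc ++ dsGo lp rem [] := by
  have H : ∀ n (rem : List (Int × Int × Int × Int)), rem.length = n →
      ∀ acc, dsGo lp rem acc = acc ++ dsGo lp rem [] := by
    intro n
    induction n using Nat.strong_induction_on with
    | _ n ih =>
      intro rem hn acc
      match rem, hn with
      | [], _ => simp [dsGo]
      | x :: t, hn =>
        have hlt : ((x :: t).filter (fun y => !(y.2.2.2 == x.2.2.2))).length < n := by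
          have h3 := List.length_filter_le (fun y : Int × Int × Int × Int => !(y.2.2.2 == x.2.2.2)) t
          have hn' : t.length + 1 = n := by simpa using hn
          simp only [List.filter_cons, beq_self_eq_true, Bool.not_true, Bool.false_eq_true,
            if_false]
          omega
        have h1 := ih _ hlt ((x :: t).filter (fun y => !(y.2.2.2 == x.2.2.2))) rfl
          (acc ++ PySem.List.sorted ((x :: t).filter (fun y => y.2.2.2 == x.2.2.2))
            (fun y => |y.2.1 - lp|) false)
        have h2 := ih _ hlt ((x :: t).filter (fun y => !(y.2.2.2 == x.2.2.2))) rfl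
          ([] ++ PySem.List.sorted ((x :: t).filter (fun y => y.2.2.2 == x.2.2.2))
            (fun y => |y.2.1 - lp|) false)
        simp only [dsGo]
        rw [h1, h2]
        simp
  exact H rem.length rem rfl acc

theorem flat_eq_dsGo (lp : Int) (pd : List (Int × Int × Int × Int)) :
    (PySem.Set.ofList (pd.map (fun x => x.2.2.2))).flatMap
        (fun k => PySem.List.sorted (pd.filter (fun x => x.2.2.2 == k))
                   (fun x => |x.2.1 - lp|) false) = dsGo lp pd [] := by
  have H : ∀ n (pd : List (Int × Int × Int × Int)), pd.length = n →
      (PySem.Set.ofList (pd.map (fun x => x.2.2.2))).flatMap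
        (fun k => PySem.List.sorted (pd.filter (fun x => x.2.2.2 == k))
                   (fun x => |x.2.1 - lp|) false) = dsGo lp pd [] := by
    intro n
    induction n using Nat.strong_induction_on with
    | _ n ih =>
      intro pd hn
      match pd, hn with
      | [], _ => simp [dsGo, PySem.Set.ofList, PySem.Set.empty]
      | x :: t, hn =>
        have hrest : (x :: t).filter (fun y => !(y.2.2.2 == x.2.2.2))
            = t.filter (fun y => !(y.2.2.2 == x.2.2.2)) := by
          simp
        have hlt : (t.filter (fun y => !(y.2.2.2 == x.2.2.2))).length < n := by
          have h3 := List.length_filter_le (fun y : Int × Int × Int × Int => !(y.2.2.2 == x.2.2.2)) t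
          have hn' : t.length + 1 = n := by simpa using hn
          omega
        have hkeysrest : (t.filter (fun y => !(y.2.2.2 == x.2.2.2))).map (fun y => y.2.2.2)
            = ((t.map (fun y => y.2.2.2)).filter (fun b => !(b == x.2.2.2))) := by
          rw [List.filter_map]
          simp [Function.comp_def]
        have hgroup : ∀ k, k ≠ x.2.2.2 →
            (x :: t).filter (fun y => y.2.2.2 == k)
              = (t.filter (fun y => !(y.2.2.2 == x.2.2.2))).filter (fun y => y.2.2.2 == k) := by
          intro k hk
          rw [List.filter_filter, List.filter_cons]
          have hx : (x.2.2.2 == k) = false := by simp [Ne.symm hk]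
          rw [hx]
          simp only [Bool.false_eq_true, if_false]
          refine (List.filter_congr ?_).symm
          intro y _
          by_cases h : y.2.2.2 = k
          · simp [h, hk]
          · simp [h]
        have hIH := ih _ hlt (t.filter (fun y => !(y.2.2.2 == x.2.2.2))) rfl
        rw [hkeysrest] at hIH
        rw [List.map_cons, ofList_cons, List.flatMap_cons]
        simp only [dsGo]
        rw [hrest, dsGo_acc]
        simp only [List.nil_append]
        congr 1
        rw [← hIH, List.flatMap_def, List.flatMap_def]
        congr 1
        refine List.map_congr_left ?_
        intro k hk
        have hkne : k ≠ x.2.2.2 := by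
          rw [PySem.Set.mem_ofList] at hk
          have h2 := (List.mem_filter.mp hk).2
          simpa using h2
        rw [hgroup k hkne]
  exact H pd.length pd rfl

-- ===== VERDICT (by name: the statement is the Claim_ definition above) =====
theorem data_sorter_spec : Claim_equal_data_sorter := by
  intro pd lp _
  unfold Spec_data_sorter data_sorter_alt
  rw [dataSorter_eq_flat, flat_eq_dsGo]
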